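-- pv_equiv track=rewrite | github.com/exam-data/NETEMVocabulary | scripts/update/update_doc.py | concatenate_with_newlines
-- ===== SOURCE A (Python) =====
-- def concatenate_with_newlines(str_list):
--     result = str_list[0]
--     for i in range(1, len(str_list)):
--         current_length = len(result)
--         next_length = len(str_list[i])
--         if current_length + next_length > 6 and current_length < 6:
--             result += '\n'
--         result += str_list[i]
--     return result
-- ===== SOURCE B (Python) =====
-- def concatenate_with_newlines(str_list):
--     # At most one newline can ever be inserted: find the crossing point, then join.
--     acc = 0
--     for i, s in enumerate(str_list):
--         if i >= 1 and acc < 6 and acc + len(s) > 6: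
--             return ''.join(str_list[:i]) + '\n' + ''.join(str_list[i:])
--         acc += len(s)
--     return ''.join(str_list)
-- ===== Notes on version B (the rewrite author's own statement) =====
-- stated objective: alternative
-- what changed: Instead of growing a result string and testing lengths at each append, B exploits that at most one newline can ever be inserted: it scans once for the unique crossing index and builds the output with two joins (or one if no crossing).
import Mathlib
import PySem

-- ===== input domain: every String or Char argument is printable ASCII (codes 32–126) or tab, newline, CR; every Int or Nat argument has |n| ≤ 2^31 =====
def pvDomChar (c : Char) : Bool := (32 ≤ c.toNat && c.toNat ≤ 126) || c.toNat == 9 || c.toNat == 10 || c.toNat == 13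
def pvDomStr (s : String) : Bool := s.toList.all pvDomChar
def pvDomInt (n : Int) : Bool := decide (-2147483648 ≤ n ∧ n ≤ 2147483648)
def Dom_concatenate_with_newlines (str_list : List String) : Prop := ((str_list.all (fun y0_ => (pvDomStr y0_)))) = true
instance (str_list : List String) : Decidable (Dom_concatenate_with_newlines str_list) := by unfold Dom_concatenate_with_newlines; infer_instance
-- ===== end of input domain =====

-- B replaces A's grow-a-string loop by locating the unique newline crossing point and
-- joining the two halves once (objective: alternative decomposition, same cost).

-- ===== PORT A =====
def concatenate_with_newlines (str_list : List String) : String :=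
  let result := PySem.List.pyGetD str_list 0 ""
  (PySem.List.pyRange 1 (str_list.length : Int) 1).foldl
    (fun result i =>
      let current_length : Int := PySem.Str.len result
      let next_length : Int := PySem.Str.len (PySem.List.pyGetD str_list i "")
      let result := if current_length + next_length > 6 ∧ current_length < 6 then result ++ "\n" else result
      result ++ PySem.List.pyGetD str_list i "") result

-- ===== PORT B =====
-- the early-returning 'for i, s in enumerate(str_list)' loop of Source B, as structural recursion
def cwnAux (str_list : List String) : List (Int × String) → Int → String
  | [], _acc => PySem.Str.join "" str_list
  | (i, s) :: rest, acc =>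
      if 1 ≤ i ∧ acc < 6 ∧ acc + PySem.Str.len s > 6 then
        PySem.Str.join "" (PySem.List.slice str_list none (some i)) ++ "\n" ++
          PySem.Str.join "" (PySem.List.slice str_list (some i) none)
      else cwnAux str_list rest (acc + PySem.Str.len s)

def concatenate_with_newlines_alt (str_list : List String) : String :=
  cwnAux str_list (PySem.List.enumerate str_list 0) 0

-- ===== PRECONDITION & SPEC =====
-- A raises IndexError on the empty list (str_list[0]); Pre_ excludes exactly that input.
def Pre_concatenate_with_newlines (str_list : List String) : Prop := str_list ≠ []
instance (str_list : List String) : Decidable (Pre_concatenate_with_newlines str_list) := by unfold Pre_concatenate_with_newlines; infer_instance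
def pvWitness_concatenate_with_newlines : List String := (["abc", "defg"])

def Spec_concatenate_with_newlines (str_list : List String) (out : String) : Prop := out = concatenate_with_newlines_alt str_list
instance (str_list : List String) (out : String) : Decidable (Spec_concatenate_with_newlines str_list out) := by unfold Spec_concatenate_with_newlines; infer_instance

-- ===== CLAIM (what is proved, stated in full; the proofs are below) =====
def Claim_equal_concatenate_with_newlines : Prop := ∀ (str_list : List String), Dom_concatenate_with_newlines str_list → Pre_concatenate_with_newlines str_list → Spec_concatenate_with_newlines str_list (concatenate_with_newlines str_list)

-- ===== LEMMAS AND PROOFS =====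

-- A's loop body as a two-argument step function
def stepA (acc s : String) : String :=
  (if PySem.Str.len acc + PySem.Str.len s > 6 ∧ PySem.Str.len acc < 6 then acc ++ "\n" else acc) ++ s

theorem inter_nil (l : List (List Char)) : List.intercalate [] l = l.flatten := by
  induction l with
  | nil => rfl
  | cons x xs ih =>
    cases xs with
    | nil => simp [List.intercalate]
    | cons y ys =>
      simp only [List.intercalate, List.intersperse] at *
      simp_all

theorem join_empty_cons (a : String) (l : List String) :
    PySem.Str.join "" (a :: l) = a ++ PySem.Str.join "" l := by
  simp only [PySem.Str.join, PySem.Chars.join, String.toList_empty, inter_nil, List.map_cons,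
    List.flatten_cons, String.ofList_append, String.ofList_toList]

theorem len_nonneg (s : String) : 0 ≤ PySem.Str.len s := by
  rw [PySem.Str.len_eq]; exact Int.natCast_nonneg _

-- once the running string has length ≥ 6, A never inserts another newline
theorem foldl_stepA_of_long (t : List String) (acc : String) (h : 6 ≤ PySem.Str.len acc) :
    t.foldl stepA acc = acc ++ PySem.Str.join "" t := by
  induction t generalizing acc with
  | nil => simp [PySem.Str.join, PySem.Chars.join, List.intercalate]
  | cons s t ih =>
    have hstep : stepA acc s = acc ++ s := by
      simp only [stepA]
      rw [if_neg (by omega)]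
    rw [List.foldl_cons, hstep, ih (acc ++ s) (by rw [PySem.Str.len_append]; have := len_nonneg s; omega),
      join_empty_cons, String.append_assoc]

theorem take_drop_succ (xs : List String) (k : Nat) (s : String) (t : List String)
    (h : xs.drop k = s :: t) : xs.take (k + 1) = xs.take k ++ [s] := by
  have h0 : xs[k]? = some s := by
    have h' : (List.drop k xs)[0]? = xs[k + 0]? := List.getElem?_drop
    rw [h] at h'; simpa using h'.symm
  rw [List.take_add_one, h0]; rfl

theorem join_empty_append (l m : List String) :
    PySem.Str.join "" (l ++ m) = PySem.Str.join "" l ++ PySem.Str.join "" m := by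
  induction l with
  | nil => simp [PySem.Str.join, PySem.Chars.join, List.intercalate]
  | cons a l ih => rw [List.cons_append, join_empty_cons, join_empty_cons, ih, String.append_assoc]

-- main invariant: after a newline-free prefix of k ≥ 1 strings, A's remaining fold equals B's scan
theorem main_inv (str_list : List String) (t : List String) : ∀ (k : Nat), 1 ≤ k →
    str_list.drop k = t →
    t.foldl stepA (PySem.Str.join "" (str_list.take k)) =
      cwnAux str_list (PySem.List.enumerate t (k : Int))
        (PySem.Str.len (PySem.Str.join "" (str_list.take k))) := by
  induction t with
  | nil =>
    intro k _ hdrop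
    have : str_list.take k = str_list :=
      List.take_of_length_le (by exact Nat.le_of_lt_succ (Nat.lt_succ_of_le (List.drop_eq_nil_iff.mp hdrop)))
    simp [PySem.List.enumerate, cwnAux, this]
  | cons s t ih =>
    intro k hk hdrop
    set p := PySem.Str.join "" (str_list.take k) with hp
    rw [PySem.List.enumerate_cons, List.foldl_cons]
    by_cases h6 : PySem.Str.len p < 6 ∧ PySem.Str.len p + PySem.Str.len s > 6
    · -- the newline is inserted here, at index k
      have hcond : (1 ≤ (k : Int) ∧ PySem.Str.len p < 6 ∧ PySem.Str.len p + PySem.Str.len s > 6) := by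
        exact ⟨by exact_mod_cast hk, h6⟩
      rw [cwnAux, if_pos hcond]
      have hstep : stepA p s = (p ++ "\n") ++ s := by
        simp only [stepA]; rw [if_pos (by omega)]
      rw [hstep, foldl_stepA_of_long t _ (by
        rw [PySem.Str.len_append, PySem.Str.len_append]
        have h1 : PySem.Str.len "\n" = 1 := by decide
        omega)]
      rw [PySem.List.slice_to str_list (by positivity), PySem.List.slice_from str_list (by positivity)]
      simp only [Int.toNat_natCast]
      rw [hdrop, join_empty_cons, ← hp, String.append_assoc, String.append_assoc]
    · -- no newline at index k: extend the prefix and recurse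
      have hcond : ¬ (1 ≤ (k : Int) ∧ PySem.Str.len p < 6 ∧ PySem.Str.len p + PySem.Str.len s > 6) := by
        intro hc; exact h6 hc.2
      rw [cwnAux, if_neg hcond]
      have hstep : stepA p s = p ++ s := by
        simp only [stepA]; rw [if_neg (by omega)]
      have htake : str_list.take (k + 1) = str_list.take k ++ [s] := take_drop_succ _ _ _ _ hdrop
      have hjoin : PySem.Str.join "" (str_list.take (k + 1)) = p ++ s := by
        rw [htake, join_empty_append, hp, join_empty_cons]
        simp [PySem.Str.join, PySem.Chars.join, List.intercalate, String.append_empty]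
      have hdrop' : str_list.drop (k + 1) = t := by
        rw [List.drop_add_one_eq_tail_drop, hdrop]; rfl
      have := ih (k + 1) (by omega) hdrop'
      rw [hjoin] at this
      rw [hstep, this, PySem.Str.len_append]
      norm_num

-- A's range-for loop is a fold of stepA over the tail
theorem portA_eq_fold (str_list : List String) :
    concatenate_with_newlines str_list =
      (str_list.drop 1).foldl stepA (PySem.List.pyGetD str_list 0 "") := by
  unfold concatenate_with_newlines
  have hbody : (fun (result : String) (i : Int) =>
      let current_length : Int := PySem.Str.len result
      let next_length : Int := PySem.Str.len (PySem.List.pyGetD str_list i "")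
      let result' := if current_length + next_length > 6 ∧ current_length < 6 then result ++ "\n" else result
      result' ++ PySem.List.pyGetD str_list i "") =
      (fun acc j => stepA acc (PySem.List.pyGetD str_list j "")) := by
    funext acc j; simp [stepA]
  simp only []
  rw [hbody, PySem.List.foldl_pyRange_pyGetD' str_list "" stepA _ (by norm_num)]
  rfl

-- ===== VERDICT (by name: the statement is the Claim_ definition above) =====
theorem concatenate_with_newlines_spec : Claim_equal_concatenate_with_newlines := by
  intro str_list _hdom hpre
  unfold Spec_concatenate_with_newlines
  obtain ⟨h, t, rfl⟩ : ∃ h t, str_list = h :: t := by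
    cases str_list with
    | nil => exact absurd rfl hpre
    | cons h t => exact ⟨h, t, rfl⟩
  rw [portA_eq_fold]
  unfold concatenate_with_newlines_alt
  rw [PySem.List.enumerate_cons, cwnAux, if_neg (by intro hc; exact absurd hc.1 (by norm_num))]
  have h1 : (h :: t).drop 1 = t := rfl
  have h2 : PySem.List.pyGetD (h :: t) 0 "" = h := by simp [pysem]
  have h3 : (h :: t).take 1 = [h] := rfl
  have h4 : PySem.Str.join "" [h] = h := by
    rw [join_empty_cons]; simp [PySem.Str.join, PySem.Chars.join, List.intercalate, String.append_empty]
  have := main_inv (h :: t) t 1 (by omega) h1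
  rw [h3, h4] at this
  rw [h1, h2, this]
  norm_num
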